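-- pv_equiv track=rewrite | github.com/mightyoung/open-young-director | lib/crewai/src/crewai/content/novel/feedback_applier.py | _format_feedback
-- ===== SOURCE A (Python) =====
-- def _format_feedback(feedback: dict) -> str:
--     """格式化反馈为可读字符串"""
--     parts = []
--
--     char_adj = feedback.get("character_adjustments", [])
--     if char_adj:
--         parts.append("角色调整:")
--         for adj in char_adj:
--             parts.append(f"  - {adj.get('name', '')}: {adj.get('aspect', '')} → {adj.get('to', '')}")
--
--     plot_adj = feedback.get("plot_adjustments", [])
--     if plot_adj:
--         parts.append("情节调整:")
--         for adj in plot_adj: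
--             parts.append(f"  - {adj.get('element', '')}: {adj.get('change', '')} - {adj.get('detail', '')}")
--
--     tone_adj = feedback.get("tone_adjustments", [])
--     if tone_adj:
--         parts.append("风格调整:")
--         for adj in tone_adj:
--             parts.append(f"  - {adj.get('element', '')}: {adj.get('from', '')} → {adj.get('to', '')}")
--
--     return "\n".join(parts) if parts else "无具体调整指令"
-- ===== SOURCE B (Python) =====
-- # Recursive descent over uniform section specs; builds the result string directly
-- # by concatenation (no parts list, no join).
-- _SPECS = [
--     ("character_adjustments", "角色调整:", ("name", ": ", "aspect", " → ", "to")),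
--     ("plot_adjustments", "情节调整:", ("element", ": ", "change", " - ", "detail")),
--     ("tone_adjustments", "风格调整:", ("element", ": ", "from", " → ", "to")),
-- ]
--
--
-- def _line(fields, a):
--     k1, s1, k2, s2, k3 = fields
--     return "  - " + a.get(k1, "") + s1 + a.get(k2, "") + s2 + a.get(k3, "")
--
--
-- def _go(feedback, specs):
--     if not specs:
--         return ""
--     key, header, fields = specs[0]
--     text = ""
--     for a in feedback.get(key, []):
--         text += "\n" + _line(fields, a)
--     tail = _go(feedback, specs[1:])
--     if not text:
--         return tail
--     if not tail:
--         return header + text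
--     return header + text + "\n" + tail
--
--
-- def _format_feedback(feedback: dict) -> str:
--     """格式化反馈为可读字符串"""
--     out = _go(feedback, _SPECS)
--     return out if out else "无具体调整指令"
-- ===== Notes on version B (the rewrite author's own statement) =====
-- stated objective: alternative
-- what changed: A appends header/line strings to a flat parts list in three copy-pasted branches and finally '\n'.join's it; B recurses over a list of uniform section specs and builds the final string directly by concatenation (per-section text accumulated into a string, sections glued with a separator-aware recursive tail), with no intermediate list and no join.
import Mathlib
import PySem

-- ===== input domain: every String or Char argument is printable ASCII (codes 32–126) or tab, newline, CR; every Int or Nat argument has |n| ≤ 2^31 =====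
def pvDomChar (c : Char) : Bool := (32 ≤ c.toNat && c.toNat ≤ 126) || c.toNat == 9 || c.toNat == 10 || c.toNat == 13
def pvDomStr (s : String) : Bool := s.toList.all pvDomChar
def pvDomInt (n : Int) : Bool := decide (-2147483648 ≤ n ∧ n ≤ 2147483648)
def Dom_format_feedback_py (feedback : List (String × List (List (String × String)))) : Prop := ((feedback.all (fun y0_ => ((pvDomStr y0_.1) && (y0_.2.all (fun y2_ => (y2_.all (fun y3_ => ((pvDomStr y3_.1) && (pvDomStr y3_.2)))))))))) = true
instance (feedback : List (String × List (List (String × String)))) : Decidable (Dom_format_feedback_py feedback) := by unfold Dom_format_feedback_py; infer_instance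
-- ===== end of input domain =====

-- ===== PORT A =====
-- B builds the result by recursive descent over uniform section specs, concatenating
-- strings directly instead of A's append-to-parts-list-then-join ("alternative").
-- line for one character adjustment: "  - {name}: {aspect} → {to}"
def fbLineCharA (adj : List (String × String)) : String :=
  "  - " ++ (PySem.Dict.mk adj).getD "name" "" ++ ": " ++ (PySem.Dict.mk adj).getD "aspect" "" ++ " → " ++ (PySem.Dict.mk adj).getD "to" ""
-- line for one plot adjustment: "  - {element}: {change} - {detail}"
def fbLinePlotA (adj : List (String × String)) : String :=
  "  - " ++ (PySem.Dict.mk adj).getD "element" "" ++ ": " ++ (PySem.Dict.mk adj).getD "change" "" ++ " - " ++ (PySem.Dict.mk adj).getD "detail" ""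
-- line for one tone adjustment: "  - {element}: {from} → {to}"
def fbLineToneA (adj : List (String × String)) : String :=
  "  - " ++ (PySem.Dict.mk adj).getD "element" "" ++ ": " ++ (PySem.Dict.mk adj).getD "from" "" ++ " → " ++ (PySem.Dict.mk adj).getD "to" ""

def format_feedback_py (feedback : List (String × List (List (String × String)))) : String :=
  let d := PySem.Dict.mk feedback
  let parts : List String := []
  let char_adj := d.getD "character_adjustments" []
  let parts := if char_adj.isEmpty then parts else
    char_adj.foldl (fun ps adj => ps ++ [fbLineCharA adj]) (parts ++ ["角色调整:"])
  let plot_adj := d.getD "plot_adjustments" []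
  let parts := if plot_adj.isEmpty then parts else
    plot_adj.foldl (fun ps adj => ps ++ [fbLinePlotA adj]) (parts ++ ["情节调整:"])
  let tone_adj := d.getD "tone_adjustments" []
  let parts := if tone_adj.isEmpty then parts else
    tone_adj.foldl (fun ps adj => ps ++ [fbLineToneA adj]) (parts ++ ["风格调整:"])
  if parts.isEmpty then "无具体调整指令" else PySem.Str.join "\n" parts

-- ===== PORT B =====
-- Source B's _line: one item's line from the uniform (k1, s1, k2, s2, k3) field spec
def fbLineB (k1 s1 k2 s2 k3 : String) (a : List (String × String)) : String :=
  "  - " ++ (PySem.Dict.mk a).getD k1 "" ++ s1 ++ (PySem.Dict.mk a).getD k2 "" ++ s2 ++ (PySem.Dict.mk a).getD k3 ""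

-- Source B's _SPECS: (key, header, (k1, s1, k2, s2, k3))
def fbSpecs : List (String × String × String × String × String × String × String) :=
  [ ("character_adjustments", "角色调整:", "name", ": ", "aspect", " → ", "to"),
    ("plot_adjustments", "情节调整:", "element", ": ", "change", " - ", "detail"),
    ("tone_adjustments", "风格调整:", "element", ": ", "from", " → ", "to") ]

-- Source B's _go: recursion over the specs, building the string directly
def fbGo (d : PySem.Dict String (List (List (String × String)))) :
    List (String × String × String × String × String × String × String) → String
  | [] => ""
  | (key, header, k1, s1, k2, s2, k3) :: rest =>
    let text := (d.getD key []).foldl (fun t a => t ++ "\n" ++ fbLineB k1 s1 k2 s2 k3 a) ""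
    let tail := fbGo d rest
    if text = "" then tail
    else if tail = "" then header ++ text
    else header ++ text ++ "\n" ++ tail

def format_feedback_py_alt (feedback : List (String × List (List (String × String)))) : String :=
  let out := fbGo (PySem.Dict.mk feedback) fbSpecs
  if out = "" then "无具体调整指令" else out

-- ===== PRECONDITION & SPEC =====
def Spec_format_feedback_py (feedback : List (String × List (List (String × String)))) (out : String) : Prop := out = format_feedback_py_alt feedback
instance (feedback : List (String × List (List (String × String)))) (out : String) : Decidable (Spec_format_feedback_py feedback out) := by unfold Spec_format_feedback_py; infer_instance

-- ===== CLAIM =====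
def Claim_equal_format_feedback_py : Prop := ∀ (feedback : List (String × List (List (String × String)))), Dom_format_feedback_py feedback → Spec_format_feedback_py feedback (format_feedback_py feedback)

-- ===== LEMMAS AND PROOFS =====

-- B's per-section text accumulator, named for the proofs
def fbText (f : List (String × String) → String) (items : List (List (String × String))) : String :=
  items.foldl (fun t a => t ++ "\n" ++ f a) ""

theorem fbText_eq (f : List (String × String) → String) (items : List (List (String × String))) :
    items.foldl (fun t a => t ++ "\n" ++ f a) "" = fbText f items := rfl

theorem fbText_nil (f : List (String × String) → String) : fbText f [] = "" := rfl

-- A's three line helpers are instances of B's uniform line helper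
theorem fbLineCharA_eq : fbLineCharA = fbLineB "name" ": " "aspect" " → " "to" := rfl
theorem fbLinePlotA_eq : fbLinePlotA = fbLineB "element" ": " "change" " - " "detail" := rfl
theorem fbLineToneA_eq : fbLineToneA = fbLineB "element" ": " "from" " → " "to" := rfl

theorem fbText_foldl (f : List (String × String) → String)
    (items : List (List (String × String))) : ∀ (s : String),
    items.foldl (fun t a => t ++ "\n" ++ f a) s = s ++ fbText f items := by
  induction items with
  | nil => intro s; simp [fbText]
  | cons x xs ih =>
      intro s
      have hx : fbText f (x :: xs) = ("" ++ "\n" ++ f x) ++ fbText f xs := by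
        simp only [fbText, List.foldl_cons]
        rw [ih]
        rfl
      rw [List.foldl_cons, ih, hx]
      simp [String.append_assoc]

theorem fbText_cons (f : List (String × String) → String)
    (x : List (String × String)) (xs : List (List (String × String))) :
    fbText f (x :: xs) = "\n" ++ f x ++ fbText f xs := by
  have : fbText f (x :: xs) = ("" ++ "\n" ++ f x) ++ fbText f xs := by
    simp only [fbText, List.foldl_cons]
    rw [fbText_foldl]
    rfl
  rw [this]
  simp [String.append_assoc]

theorem fbText_ne_empty (f : List (String × String) → String)
    (x : List (String × String)) (xs : List (List (String × String))) :
    fbText f (x :: xs) ≠ "" := by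
  rw [fbText_cons]
  intro h
  have := congrArg String.toList h
  simp [String.toList_append] at this

theorem strJoin_singleton (sep p : String) : PySem.Str.join sep [p] = p := by
  simp [PySem.Str.join, PySem.Chars.join_singleton, String.ofList_toList]

theorem strJoin_cons_cons (sep p q : String) (rest : List String) :
    PySem.Str.join sep (p :: q :: rest) = p ++ sep ++ PySem.Str.join sep (q :: rest) := by
  simp only [PySem.Str.join, List.map_cons]
  rw [PySem.Chars.join_cons_cons, String.ofList_append, String.ofList_append,
    String.ofList_toList, String.ofList_toList]

-- a section block under join equals header ++ accumulated text
theorem strJoin_block (f : List (String × String) → String) :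
    ∀ (items : List (List (String × String))) (h : String),
    PySem.Str.join "\n" (h :: items.map f) = h ++ fbText f items := by
  intro items
  induction items with
  | nil => intro h; simp [strJoin_singleton, fbText]
  | cons x xs ih =>
      intro h
      rw [List.map_cons, strJoin_cons_cons, ih (f x), fbText_cons]
      simp [String.append_assoc]

-- the cons-expanded form, stable under List.map_cons during simp
theorem strJoin_block' (f : List (String × String) → String)
    (x : List (String × String)) (xs : List (List (String × String))) (h : String) :
    PySem.Str.join "\n" (h :: f x :: xs.map f) = h ++ fbText f (x :: xs) := by
  have := strJoin_block f (x :: xs) h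
  rwa [List.map_cons] at this

-- a section block followed by more parts: header ++ text ++ separator ++ rest
theorem strJoin_block_append (f : List (String × String) → String) :
    ∀ (items : List (List (String × String))) (h : String) (r : String) (rest : List String),
    PySem.Str.join "\n" (h :: (items.map f ++ (r :: rest))) =
      h ++ fbText f items ++ "\n" ++ PySem.Str.join "\n" (r :: rest) := by
  intro items
  induction items with
  | nil =>
      intro h r rest
      rw [List.map_nil, List.nil_append, strJoin_cons_cons, fbText_nil]
      simp
  | cons x xs ih =>
      intro h r rest
      rw [List.map_cons, List.cons_append, strJoin_cons_cons, ih (f x), fbText_cons]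
      simp [String.append_assoc]

-- the cons-expanded form, stable under List.map_cons / List.cons_append during simp
theorem strJoin_block_append' (f : List (String × String) → String)
    (x : List (String × String)) (xs : List (List (String × String)))
    (h : String) (r : String) (rest : List String) :
    PySem.Str.join "\n" (h :: f x :: (xs.map f ++ (r :: rest))) =
      h ++ fbText f (x :: xs) ++ "\n" ++ PySem.Str.join "\n" (r :: rest) := by
  have := strJoin_block_append f (x :: xs) h r rest
  rwa [List.map_cons, List.cons_append] at this

theorem format_feedback_py_spec_aux (feedback : List (String × List (List (String × String)))) :
    format_feedback_py feedback = format_feedback_py_alt feedback := by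
  simp only [format_feedback_py, format_feedback_py_alt, fbSpecs, fbGo,
    PySem.List.foldl_append_singleton_eq_map, List.nil_append, fbText_eq,
    fbLineCharA_eq, fbLinePlotA_eq, fbLineToneA_eq]
  cases hc : (PySem.Dict.mk feedback).getD "character_adjustments" [] with
  | nil =>
    cases hp : (PySem.Dict.mk feedback).getD "plot_adjustments" [] with
    | nil =>
      cases ht : (PySem.Dict.mk feedback).getD "tone_adjustments" [] with
      | nil => simp [fbText_nil]
      | cons t ts => simp [fbText_nil, fbText_ne_empty, strJoin_block', String.append_eq_empty_iff]
    | cons p ps =>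
      cases ht : (PySem.Dict.mk feedback).getD "tone_adjustments" [] with
      | nil => simp [fbText_nil, fbText_ne_empty, strJoin_block', String.append_eq_empty_iff]
      | cons t ts => simp [fbText_nil, fbText_ne_empty, strJoin_block', strJoin_block_append', String.append_eq_empty_iff, String.append_assoc]
  | cons c cs =>
    cases hp : (PySem.Dict.mk feedback).getD "plot_adjustments" [] with
    | nil =>
      cases ht : (PySem.Dict.mk feedback).getD "tone_adjustments" [] with
      | nil => simp [fbText_nil, fbText_ne_empty, strJoin_block', String.append_eq_empty_iff]
      | cons t ts => simp [fbText_nil, fbText_ne_empty, strJoin_block', strJoin_block_append', String.append_eq_empty_iff, String.append_assoc]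
    | cons p ps =>
      cases ht : (PySem.Dict.mk feedback).getD "tone_adjustments" [] with
      | nil => simp [fbText_nil, fbText_ne_empty, strJoin_block', strJoin_block_append', String.append_eq_empty_iff, String.append_assoc]
      | cons t ts => simp [fbText_ne_empty, strJoin_block', strJoin_block_append', String.append_eq_empty_iff, String.append_assoc]

-- ===== VERDICT =====
theorem format_feedback_py_spec : Claim_equal_format_feedback_py := by
  intro feedback _
  exact format_feedback_py_spec_aux feedback
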